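-- pv_equiv track=rewrite | github.com/rohitpmore/meetcode | problems/arrays/range_sum_sorted_subarray.py | solution
-- ===== SOURCE A (Python) =====
-- MOD = 10**9 + 7
--
-- def solution(nums: list[int], n: int, left: int, right: int) -> int:
--     # time = O(n^2 log n^2) -> O(n^2 log n)
--     # space = O(n^2)
--     subarray = []
--
--     for i in range(len(nums)): #n
--         sum = 0
--         for j in range(i, len(nums)): #n
--             sum += nums[j]
--             subarray.append(sum)
--
--     subarray.sort() #n^2 log n^2
--
--     res = 0
--
--     for i in range(left-1, right): #n^2
--         res += subarray[i]
--
--     return res %MOD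
-- ===== SOURCE B (Python) =====
-- MOD = 10**9 + 7
--
-- def solution(nums: list[int], n: int, left: int, right: int) -> int:
--     # Order statistics by rank counting: tally each subarray sum in a frequency
--     # dict; in ascending value order each distinct value v occupies the rank
--     # block [lt, lt+cnt[v]), so the answer is the sum of
--     # v * |[lt, lt+cnt[v]) intersect [left-1, right)| -- the multiset of sums is
--     # never materialised or sorted, only the distinct values are ordered.
--     cnt = {}
--     for i in range(len(nums)):
--         acc = 0
--         for j in range(i, len(nums)):
--             acc += nums[j]
--             cnt[acc] = cnt.get(acc, 0) + 1
--     res = 0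
--     lt = 0
--     for v in sorted(cnt):
--         c = cnt[v]
--         lo = max(left - 1, lt)
--         hi = min(right, lt + c)
--         if lo < hi:
--             res += v * (hi - lo)
--         lt += c
--     return res % MOD
-- ===== Notes on version B (the rewrite author's own statement) =====
-- stated objective: alternative
-- what changed: B never materialises or sorts the multiset of subarray sums: it tallies them in a frequency dict and sweeps the sorted distinct values, adding v times the overlap of v's rank block [lt, lt+cnt[v]) with [left-1, right), instead of A's sort-all-sums-and-index-a-slice.
-- outside the precondition, e.g. on solution([1, 2], 2, 0, 1): A returns 4, B returns 1
import Mathlib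
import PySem

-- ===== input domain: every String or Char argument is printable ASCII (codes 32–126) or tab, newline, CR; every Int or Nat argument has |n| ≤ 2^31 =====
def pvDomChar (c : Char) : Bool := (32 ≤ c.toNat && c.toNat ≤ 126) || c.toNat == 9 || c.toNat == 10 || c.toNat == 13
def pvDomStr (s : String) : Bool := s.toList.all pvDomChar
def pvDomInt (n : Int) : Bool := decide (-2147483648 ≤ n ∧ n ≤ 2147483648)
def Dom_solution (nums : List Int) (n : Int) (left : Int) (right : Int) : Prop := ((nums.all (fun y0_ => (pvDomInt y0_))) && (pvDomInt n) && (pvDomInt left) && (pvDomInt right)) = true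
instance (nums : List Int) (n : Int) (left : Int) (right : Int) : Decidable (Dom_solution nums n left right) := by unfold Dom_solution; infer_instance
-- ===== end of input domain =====

-- B computes the ranked range sum by rank counting over a frequency dict of the
-- subarray sums instead of sorting the whole multiset and indexing a slice
-- (objective: alternative algorithm, similar cost).

-- ===== PORT A =====
def solution (nums : List Int) (n : Int) (left : Int) (right : Int) : Int :=
  let subarray : List Int :=
    (PySem.List.pyRange 0 (nums.length : Int) 1).foldl (fun acc i =>
      ((PySem.List.pyRange i (nums.length : Int) 1).foldl
        (fun (st : Int × List Int) j =>
          let s := st.1 + PySem.List.pyGetD nums j 0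
          (s, st.2 ++ [s])) ((0 : Int), acc)).2) []
  let sortedArr := PySem.List.sorted subarray (fun x => x) false
  let res := (PySem.List.pyRange (left - 1) right 1).foldl
    (fun acc i => acc + PySem.List.pyGetD sortedArr i 0) 0
  PySem.Int.mod res (10 ^ 9 + 7)

-- ===== PORT B =====
def solution_alt (nums : List Int) (n : Int) (left : Int) (right : Int) : Int :=
  let cnt : PySem.Dict Int Int :=
    (PySem.List.pyRange 0 (nums.length : Int) 1).foldl (fun d i =>
      ((PySem.List.pyRange i (nums.length : Int) 1).foldl
        (fun (st : Int × PySem.Dict Int Int) j =>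
          let a := st.1 + PySem.List.pyGetD nums j 0
          (a, st.2.insert a (st.2.getD a 0 + 1))) ((0 : Int), d)).2) PySem.Dict.empty
  -- cnt[v] for v a key of cnt: total lookup cnt.getD v 0 is exact here
  let res :=
    ((PySem.List.sorted cnt.keys (fun x => x) false).foldl
      (fun (st : Int × Int) v =>
        let c := cnt.getD v 0
        let lo := max (left - 1) st.2
        let hi := min right (st.2 + c)
        (if lo < hi then st.1 + v * (hi - lo) else st.1, st.2 + c))
      ((0 : Int), (0 : Int))).1
  PySem.Int.mod res (10 ^ 9 + 7)

-- ===== PRECONDITION & SPEC =====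
-- Pre_ is the natural 1-based rank domain 1 ≤ left, 0 ≤ right ≤ n(n+1)/2, together
-- with all empty-range inputs right ≤ left-1 (where both programs return 0): it
-- excludes inputs where A raises IndexError (a needed rank ≥ n(n+1)/2), and inputs
-- with left ≤ 0 and a non-empty rank range, where A's value comes from Python
-- negative-index wraparound while B clamps ranks to the existing ones.
def Pre_solution (nums : List Int) (n : Int) (left : Int) (right : Int) : Prop :=
  (1 ≤ left ∧ 0 ≤ right ∧ 2 * right ≤ ((nums.length * (nums.length + 1) : Nat) : Int))
    ∨ right ≤ left - 1
instance (nums : List Int) (n : Int) (left : Int) (right : Int) : Decidable (Pre_solution nums n left right) := by unfold Pre_solution; infer_instance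

def pvWitness_solution : List Int × Int × Int × Int := ([1, 2], 2, 1, 3)

def Spec_solution (nums : List Int) (n : Int) (left : Int) (right : Int) (out : Int) : Prop := out = solution_alt nums n left right
instance (nums : List Int) (n : Int) (left : Int) (right : Int) (out : Int) : Decidable (Spec_solution nums n left right out) := by unfold Spec_solution; infer_instance

-- ===== CLAIM (what is proved, stated in full; the proofs are below) =====
def Claim_equal_solution : Prop := ∀ (nums : List Int) (n : Int) (left : Int) (right : Int), Dom_solution nums n left right → Pre_solution nums n left right → Spec_solution nums n left right (solution nums n left right)

-- ===== LEMMAS AND PROOFS =====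

-- the multiset of all subarray sums, in A's/B's common generation order
def subSums (nums : List Int) : List Int :=
  (List.range nums.length).flatMap (fun a =>
    (List.range (nums.length - a)).map (fun k => ((nums.drop a).take (k + 1)).sum))

-- the running-sum loop body, generic in what is done with each produced sum
theorem gen_accum {β : Type} (upd : β → Int → β) :
    ∀ (xs : List Int) (s0 : Int) (b : β),
      xs.foldl (fun (st : Int × β) x => (st.1 + x, upd st.2 (st.1 + x))) (s0, b)
        = (s0 + xs.sum,
           ((List.range xs.length).map (fun k => s0 + (xs.take (k + 1)).sum)).foldl upd b)
  | [], s0, b => by simp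
  | x :: xs, s0, b => by
    simp only [List.foldl_cons]
    rw [gen_accum upd xs (s0 + x) (upd b (s0 + x))]
    refine Prod.ext (by simp [add_assoc]) ?_
    simp only [List.length_cons, List.range_succ_eq_map, List.map_cons, List.map_map]
    simp [Function.comp_def, List.take_succ_cons, add_assoc]

-- the whole double generation loop, generic in what is done with each produced sum
theorem gen_both {β : Type} (upd : β → Int → β) (nums : List Int) (b0 : β) :
    (PySem.List.pyRange 0 (nums.length : Int) 1).foldl (fun b i =>
      ((PySem.List.pyRange i (nums.length : Int) 1).foldl
        (fun (st : Int × β) j =>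
          (st.1 + PySem.List.pyGetD nums j 0, upd st.2 (st.1 + PySem.List.pyGetD nums j 0)))
        ((0 : Int), b)).2) b0
    = (subSums nums).foldl upd b0 := by
  rw [subSums, List.foldl_flatMap]
  have houter : PySem.List.pyRange 0 (nums.length : Int) 1
      = List.map (fun (a : Nat) => (a : Int)) (List.range nums.length) := by
    rw [PySem.List.pyRange_one]
    have h1 : ((nums.length : Int) - 0).toNat = nums.length := by omega
    rw [h1]
    exact List.map_congr_left (fun k _ => by simp)
  rw [houter, List.foldl_map]
  induction (List.range nums.length) generalizing b0 with
  | nil => simp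
  | cons a l ih =>
    simp only [List.foldl_cons]
    rw [ih]
    congr 1
    have hinner : (PySem.List.pyRange (a : Int) (nums.length : Int) 1).foldl
        (fun (st : Int × β) j =>
          (st.1 + PySem.List.pyGetD nums j 0, upd st.2 (st.1 + PySem.List.pyGetD nums j 0)))
        ((0 : Int), b0)
      = (nums.drop a).foldl
          (fun (st : Int × β) x => (st.1 + x, upd st.2 (st.1 + x))) ((0 : Int), b0) := by
      have := PySem.List.foldl_pyRange_pyGetD' nums 0
        (fun (st : Int × β) x => (st.1 + x, upd st.2 (st.1 + x))) ((0 : Int), b0)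
        (a := (a : Int)) (by positivity)
      simpa using this
    rw [hinner, gen_accum]
    simp only [List.length_drop]
    congr 1
    exact (List.map_congr_left (fun k _ => by rw [zero_add])).symm

-- range(a,b) mapped through xs[·] is the sublist xs[a:b] (b within bounds)
theorem map_getD_range (xs : List Int) (a b : Nat) (hb : b ≤ xs.length) :
    (PySem.List.pyRange (a : Int) (b : Int) 1).map (fun i => PySem.List.pyGetD xs i 0)
      = (xs.drop a).take (b - a) := by
  rw [PySem.List.pyRange_one]
  have h1 : ((b : Int) - (a : Int)).toNat = b - a := by omega
  rw [h1, List.map_map]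
  apply List.ext_getElem
  · simp [Nat.min_def]; omega
  · intro k hk1 hk2
    simp only [List.length_map, List.length_range] at hk1
    have hak : a + k < xs.length := by omega
    simp only [List.getElem_map, List.getElem_range, Function.comp]
    have hcast : ((a : Int) + (k : Int)) = ((a + k : Nat) : Int) := by push_cast; ring
    rw [hcast, PySem.List.pyGetD_natCast, List.getD_eq_getElem?_getD,
        List.getElem?_eq_getElem hak]
    simp only [List.getElem_take, List.getElem_drop, Option.getD_some]

-- twice the number of generated subarray sums is n(n+1)
theorem tri (L : Nat) : ((List.range L).map (fun k => L - k)).sum * 2 = L * (L + 1) := by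
  induction L with
  | zero => simp
  | succ m ih =>
    rw [List.range_succ, List.map_append, List.sum_append]
    have hshift : (List.range m).map (fun k => m + 1 - k) = (List.range m).map (fun k => (m - k) + 1) :=
      List.map_congr_left (fun k hk => by have := List.mem_range.mp hk; omega)
    have hsum : ((List.range m).map (fun k => (m - k) + 1)).sum
        = ((List.range m).map (fun k => m - k)).sum + m := by
      rw [List.sum_map_add]
      simp [List.map_const']
    have hx : m + 1 - m = 1 := by omega
    simp only [hshift, hsum, List.map_singleton, List.sum_cons, List.sum_nil, hx]
    nlinarith [ih]

theorem subSums_len (nums : List Int) :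
    (subSums nums).length * 2 = nums.length * (nums.length + 1) := by
  rw [subSums, List.length_flatMap]
  have h : ∀ k ∈ List.range nums.length,
      ((fun a => ((List.range (nums.length - a)).map
          (fun k => ((nums.drop a).take (k + 1)).sum)).length) k) = nums.length - k := by
    intro k _; simp
  rw [List.map_congr_left h]
  exact tri nums.length

-- sum of an if-singleton over a list with distinct elements
theorem sum_map_ite_of_nodup : ∀ (ds : List Int), ds.Nodup → ∀ (x y : Int), x ∈ ds →
    (ds.map (fun v => if v = x then y else 0)).sum = y
  | [], _, x, y, hx => by simp at hx
  | d :: ds, hnd, x, y, hx => by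
    simp only [List.map_cons, List.sum_cons]
    rcases List.mem_cons.mp hx with rfl | hx'
    · have hz : (ds.map (fun v => if v = x then y else 0)).sum = 0 := by
        apply List.sum_eq_zero
        intro z hz
        obtain ⟨v, hv, rfl⟩ := List.mem_map.mp hz
        have : v ≠ x := fun h => (List.nodup_cons.mp hnd).1 (h ▸ hv)
        simp [this]
      simp [hz]
    · have hdx : d ≠ x := fun h => (List.nodup_cons.mp hnd).1 (h ▸ hx')
      rw [sum_map_ite_of_nodup ds (List.nodup_cons.mp hnd).2 x y hx']
      simp [hdx]

-- sum over lists of pointwise differences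
theorem sum_map_sub_int {α : Type} : ∀ (xs : List α) (f g : α → Int),
    (xs.map (fun v => f v - g v)).sum = (xs.map f).sum - (xs.map g).sum
  | [], _, _ => by simp
  | x :: xs, f, g => by
    simp only [List.map_cons, List.sum_cons, sum_map_sub_int xs f g]; ring

-- countP of a list as a sum of counts over any nodup list covering its values
theorem countP_eq_sum_counts (p : Int → Prop) [DecidablePred p] :
    ∀ (S : List Int) (ds : List Int), ds.Nodup → (∀ x ∈ S, x ∈ ds) →
    ((S.countP (fun w => decide (p w)) : Nat) : Int)
      = (ds.map (fun v => if p v then ((S.count v : Nat) : Int) else 0)).sum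
  | [], ds, hnd, hcov => by
    simp only [List.countP_nil, List.count_nil]
    rw [List.sum_eq_zero]
    · simp
    · intro z hz
      obtain ⟨v, _, rfl⟩ := List.mem_map.mp hz
      simp
  | x :: S, ds, hnd, hcov => by
    have ih := countP_eq_sum_counts p S ds hnd (fun y hy => hcov y (List.mem_cons_of_mem _ hy))
    have hsplit : (ds.map (fun v => if p v then ((((x :: S).count v : Nat)) : Int) else 0))
        = ds.map (fun v => (if p v then ((S.count v : Nat) : Int) else 0)
            + (if v = x then (if p x then (1 : Int) else 0) else 0)) := by
      refine List.map_congr_left (fun v _ => ?_)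
      by_cases hvx : v = x
      · subst hvx
        by_cases hp : p v <;> simp [hp, List.count_cons_self]
      · have : (x :: S).count v = S.count v := by
          rw [List.count_cons]
          split_ifs with h
          · exfalso; have := beq_iff_eq.mp h; omega
          · simp
        by_cases hp : p v <;> simp [hp, this, hvx]
    rw [hsplit, PySem.List.sum_map_add_int, ← ih,
        sum_map_ite_of_nodup ds hnd x _ (hcov x List.mem_cons_self)]
    rw [List.countP_cons]
    by_cases hp : p x <;> simp [hp]

-- countP (≤ v) splits into countP (< v) plus the multiplicity of v
theorem countP_le_split : ∀ (S : List Int) (v : Int),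
    S.countP (fun w => decide (w ≤ v)) = S.countP (fun w => decide (w < v)) + S.count v
  | [], _ => by simp
  | x :: S, v => by
    rw [List.count_cons, List.countP_cons, List.countP_cons, countP_le_split S v]
    simp only [beq_iff_eq, decide_eq_true_eq]
    split_ifs <;> omega

-- getElem is monotone along a nondecreasing list
theorem pairwise_getElem_mono (S : List Int) (h : S.Pairwise (· ≤ ·)) {p q : Nat}
    (hpq : p ≤ q) (hq : q < S.length) : S[p] ≤ S[q] := by
  rcases Nat.lt_or_ge p q with hlt | hge
  · exact List.pairwise_iff_getElem.mp h p q (by omega) hq hlt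
  · have : p = q := by omega
    subst this; exact le_refl _

-- rank bounds in a nondecreasing list: elements strictly below S[t] all sit before index t
theorem rank_lb (S : List Int) (hsort : S.Pairwise (· ≤ ·)) (t : Nat) (ht : t < S.length) :
    S.countP (fun w => decide (w < S[t])) ≤ t := by
  have hmono : ∀ j (hj : j < S.length), t ≤ j → S[t] ≤ S[j] :=
    fun j hj htj => pairwise_getElem_mono S hsort htj hj
  generalize hx : S[t] = x
  rw [hx] at hmono
  have hsp : S.countP (fun w => decide (w < x))
      = (S.take t).countP (fun w => decide (w < x))
        + (S.drop t).countP (fun w => decide (w < x)) := by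
    conv_lhs => rw [← List.take_append_drop t S]
    rw [List.countP_append]
  have h1 : (S.take t).countP (fun w => decide (w < x)) ≤ t :=
    le_trans List.countP_le_length (by simp)
  have h2 : (S.drop t).countP (fun w => decide (w < x)) = 0 := by
    rw [List.countP_eq_zero]
    intro y hy
    obtain ⟨j, hj, rfl⟩ := List.mem_iff_getElem.mp hy
    rw [List.getElem_drop]
    have := hmono (t + j) (by simp at hj; omega) (Nat.le_add_right t j)
    simp only [decide_eq_true_eq]
    omega
  omega

-- and at least t+1 elements are ≤ S[t]
theorem rank_ub (S : List Int) (hsort : S.Pairwise (· ≤ ·)) (t : Nat) (ht : t < S.length) :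
    t < S.countP (fun w => decide (w ≤ S[t])) := by
  have hmono : ∀ j (hj : j < S.length), j ≤ t → S[j] ≤ S[t] :=
    fun j hj hjt => pairwise_getElem_mono S hsort hjt ht
  generalize hx : S[t] = x
  rw [hx] at hmono
  have hsp : S.countP (fun w => decide (w ≤ x))
      = (S.take (t + 1)).countP (fun w => decide (w ≤ x))
        + (S.drop (t + 1)).countP (fun w => decide (w ≤ x)) := by
    conv_lhs => rw [← List.take_append_drop (t + 1) S]
    rw [List.countP_append]
  have hlen : (S.take (t + 1)).length = t + 1 := by rw [List.length_take]; omega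
  have hall : ∀ y ∈ S.take (t + 1), decide (y ≤ x) = true := by
    intro y hy
    obtain ⟨j, hj, rfl⟩ := List.mem_iff_getElem.mp hy
    rw [List.getElem_take]
    have hjt : j ≤ t := by simp at hj; omega
    have := hmono j (by simp at hj; omega) hjt
    simpa using this
  have htk : (S.take (t + 1)).countP (fun w => decide (w ≤ x)) = t + 1 := by
    rw [List.countP_eq_length.mpr hall, hlen]
  omega

-- the sum of the t smallest elements, by rank counting over distinct values
theorem take_sum_eq (S ds : List Int) (hsort : S.Pairwise (· ≤ ·)) (hnd : ds.Nodup)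
    (hcov : ∀ x ∈ S, x ∈ ds) :
    ∀ t : Nat, t ≤ S.length →
    (S.take t).sum
      = (ds.map (fun v => v * min (max ((t : Int)
          - ((S.countP (fun w => decide (w < v)) : Nat) : Int)) 0)
          (((S.count v : Nat)) : Int))).sum := by
  intro t
  induction t with
  | zero =>
    intro _
    rw [List.take_zero, List.sum_nil]
    rw [eq_comm, List.sum_eq_zero]
    intro z hz
    obtain ⟨v, _, rfl⟩ := List.mem_map.mp hz
    have : min (max (((0 : Nat) : Int) - ((S.countP (fun w => decide (w < v)) : Nat) : Int)) 0)
        ((S.count v : Nat) : Int) = 0 := by push_cast; omega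
    rw [this, mul_zero]
  | succ t ih =>
    intro ht1
    have ht : t < S.length := by omega
    rw [List.take_succ_eq_append_getElem ht, List.sum_append, List.sum_cons, List.sum_nil,
        ih (by omega)]
    have hptw : ∀ v ∈ ds,
        v * min (max (((t + 1 : Nat) : Int) - ((S.countP (fun w => decide (w < v)) : Nat) : Int)) 0)
            ((S.count v : Nat) : Int)
          = v * min (max (((t : Nat) : Int) - ((S.countP (fun w => decide (w < v)) : Nat) : Int)) 0)
              ((S.count v : Nat) : Int)
            + (if v = S[t] then S[t] else 0) := by
      intro v _
      have hsplitc := countP_le_split S v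
      by_cases hvx : v = S[t]
      · have h1 := rank_lb S hsort t ht
        have h2 := rank_ub S hsort t ht
        rw [← hvx] at h1 h2
        have key : min (max (((t + 1 : Nat) : Int) - ((S.countP (fun w => decide (w < v)) : Nat) : Int)) 0)
              ((S.count v : Nat) : Int)
            = min (max (((t : Nat) : Int) - ((S.countP (fun w => decide (w < v)) : Nat) : Int)) 0)
                ((S.count v : Nat) : Int) + 1 := by
          push_cast
          omega
        rw [key, if_pos hvx, ← hvx]; ring
      · have key : min (max (((t + 1 : Nat) : Int) - ((S.countP (fun w => decide (w < v)) : Nat) : Int)) 0)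
              ((S.count v : Nat) : Int)
            = min (max (((t : Nat) : Int) - ((S.countP (fun w => decide (w < v)) : Nat) : Int)) 0)
                ((S.count v : Nat) : Int) := by
          rcases lt_trichotomy v S[t] with hlt | heq | hgt
          · have hmono : S.countP (fun w => decide (w ≤ v)) ≤ S.countP (fun w => decide (w < S[t])) :=
              List.countP_mono_left (fun a _ ha => by
                simp only [decide_eq_true_eq] at ha ⊢; omega)
            have h1 := rank_lb S hsort t ht
            push_cast
            omega
          · exact absurd heq hvx
          · have hmono : S.countP (fun w => decide (w ≤ S[t])) ≤ S.countP (fun w => decide (w < v)) :=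
              List.countP_mono_left (fun a _ ha => by
                simp only [decide_eq_true_eq] at ha ⊢; omega)
            have h2 := rank_ub S hsort t ht
            push_cast
            omega
        rw [key, if_neg hvx]; ring
    rw [List.map_congr_left hptw, PySem.List.sum_map_add_int,
        sum_map_ite_of_nodup ds hnd (S[t]) (S[t]) (hcov _ (List.getElem_mem ht))]
    ring

-- B's sweep over the sorted distinct values, with a running rank offset
theorem sweep_eq (S : List Int) (l r : Int) (hlr : l ≤ r) :
    ∀ (ds : List Int) (res0 lt0 : Int), ds.Pairwise (· < ·) →
    (∀ d ∈ ds, ((S.countP (fun w => decide (w < d)) : Nat) : Int)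
        = lt0 + (ds.map (fun e => if e < d then ((S.count e : Nat) : Int) else 0)).sum) →
    (ds.foldl (fun (st : Int × Int) v =>
        (if max l st.2 < min r (st.2 + ((S.count v : Nat) : Int))
           then st.1 + v * (min r (st.2 + ((S.count v : Nat) : Int)) - max l st.2) else st.1,
         st.2 + ((S.count v : Nat) : Int))) (res0, lt0)).1
      = res0 + (ds.map (fun v =>
          v * min (max (r - ((S.countP (fun w => decide (w < v)) : Nat) : Int)) 0) ((S.count v : Nat) : Int)
          - v * min (max (l - ((S.countP (fun w => decide (w < v)) : Nat) : Int)) 0) ((S.count v : Nat) : Int))).sum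
  | [], res0, lt0, _, _ => by simp
  | v :: ds, res0, lt0, hpair, hhyp => by
    have hv : ∀ e ∈ ds, v < e := fun e he => (List.pairwise_cons.mp hpair).1 e he
    have hlt : ((S.countP (fun w => decide (w < v)) : Nat) : Int) = lt0 := by
      have h := hhyp v List.mem_cons_self
      have hz : ((v :: ds).map (fun e => if e < v then ((S.count e : Nat) : Int) else 0)).sum = 0 := by
        apply List.sum_eq_zero
        intro z hz
        obtain ⟨e, he, rfl⟩ := List.mem_map.mp hz
        rcases List.mem_cons.mp he with rfl | he'
        · simp
        · have := hv e he'
          rw [if_neg (by omega)]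
      rw [hz] at h
      omega
    simp only [List.foldl_cons, List.map_cons, List.sum_cons]
    set c : Int := ((S.count v : Nat) : Int) with hc
    have hcnn : 0 ≤ c := by positivity
    have hih := sweep_eq S l r hlr ds
      (if max l lt0 < min r (lt0 + c) then res0 + v * (min r (lt0 + c) - max l lt0) else res0)
      (lt0 + c) (List.pairwise_cons.mp hpair).2
      (by
        intro d hd
        have h := hhyp d (List.mem_cons_of_mem _ hd)
        rw [List.map_cons, List.sum_cons, if_pos (hv d hd)] at h
        rw [h, ← hc]
        ring)
    rw [hih]
    have hterm : (if max l lt0 < min r (lt0 + c) then res0 + v * (min r (lt0 + c) - max l lt0) else res0)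
        = res0 + (v * min (max (r - ((S.countP (fun w => decide (w < v)) : Nat) : Int)) 0) c
                  - v * min (max (l - ((S.countP (fun w => decide (w < v)) : Nat) : Int)) 0) c) := by
      rw [hlt]
      by_cases hcond : max l lt0 < min r (lt0 + c)
      · rw [if_pos hcond]
        have harith : min r (lt0 + c) - max l lt0
            = min (max (r - lt0) 0) c - min (max (l - lt0) 0) c := by omega
        rw [harith]; ring
      · rw [if_neg hcond]
        have harith : min (max (r - lt0) 0) c = min (max (l - lt0) 0) c := by omega
        rw [harith]; ring
    rw [hterm]
    ring
-- the sweep yields 0 whenever the requested rank range is empty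
theorem sweep_zero (S : List Int) (l r : Int) (hrl : r ≤ l) :
    ∀ (ds : List Int) (res0 lt0 : Int),
    (ds.foldl (fun (st : Int × Int) v =>
        (if max l st.2 < min r (st.2 + ((S.count v : Nat) : Int))
           then st.1 + v * (min r (st.2 + ((S.count v : Nat) : Int)) - max l st.2) else st.1,
         st.2 + ((S.count v : Nat) : Int))) (res0, lt0)).1 = res0
  | [], res0, lt0 => rfl
  | v :: ds, res0, lt0 => by
    simp only [List.foldl_cons]
    have hcond : ¬ (max l lt0 < min r (lt0 + ((S.count v : Nat) : Int))) := by omega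
    rw [if_neg hcond]
    exact sweep_zero S l r hrl ds res0 _

-- ===== VERDICT (by name: the statement is the Claim_ definition above) =====
theorem solution_spec : Claim_equal_solution := by
  intro nums n left right _ hpre
  unfold Spec_solution
  simp only [solution, solution_alt]
  -- both generation loops produce the multiset subSums nums
  have hA := gen_both (β := List Int) (fun l a => l ++ [a]) nums []
  have hB := gen_both (β := PySem.Dict Int Int)
    (fun d a => d.insert a (d.getD a 0 + 1)) nums PySem.Dict.empty
  beta_reduce at hA hB
  rw [hA, hB, PySem.List.foldl_append_singleton, List.nil_append,
      PySem.Dict.foldl_insert_getD_add_one_eq_counter, PySem.Dict.keys_counter]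
  set M := subSums nums with hM
  set S := PySem.List.sorted M (fun x => x) false with hS
  set ds := PySem.List.sorted (PySem.Set.ofList M) (fun x => x) false with hds
  -- dictionary lookups in the sweep are multiplicities in S
  have hfun : (fun (st : Int × Int) v =>
      (if max (left - 1) st.2 < min right (st.2 + (PySem.Dict.counter M).getD v 0)
         then st.1 + v * (min right (st.2 + (PySem.Dict.counter M).getD v 0) - max (left - 1) st.2) else st.1,
       st.2 + (PySem.Dict.counter M).getD v 0))
      = (fun (st : Int × Int) v =>
      (if max (left - 1) st.2 < min right (st.2 + ((S.count v : Nat) : Int))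
         then st.1 + v * (min right (st.2 + ((S.count v : Nat) : Int)) - max (left - 1) st.2) else st.1,
       st.2 + ((S.count v : Nat) : Int))) := by
    funext st v
    have : (PySem.Dict.counter M).getD v 0 = ((S.count v : Nat) : Int) := by
      rw [PySem.Dict.getD_counter]
      have := (PySem.List.sorted_perm M (fun x => x) false).count_eq v
      rw [hS, this]
    rw [this]
  rw [hfun]
  by_cases hlr : right ≤ left - 1
  · -- empty rank range: both sides are 0
    rw [PySem.List.pyRange_one_eq_nil (by omega), List.foldl_nil,
        sweep_zero S (left - 1) right hlr ds 0 0]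
  · -- non-empty range: Pre_ gives the in-bounds branch
    rcases hpre with ⟨hl1, hr0, hrc⟩ | h2
    swap
    · omega
    have hlr' : left - 1 < right := by omega
    have hsort : S.Pairwise (· ≤ ·) := by
      have := PySem.List.sorted_pairwise M (fun x => x)
      simpa using this
    have hpair : ds.Pairwise (· < ·) := PySem.List.sorted_ofList_pairwise_lt M
    have hnd : ds.Nodup := hpair.imp (fun h => ne_of_lt h)
    have hcov : ∀ x ∈ S, x ∈ ds := by
      intro x hx
      rw [hds, PySem.List.mem_sorted, PySem.Set.mem_ofList]
      rw [hS, PySem.List.mem_sorted] at hx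
      exact hx
    -- lengths: right many ranks exist
    have hSlen : (S.length : Int) * 2 = ((nums.length * (nums.length + 1) : Nat) : Int) := by
      rw [hS, PySem.List.length_sorted, hM]
      exact_mod_cast subSums_len nums
    have hrS : right ≤ (S.length : Int) := by omega
    set l' : Nat := (left - 1).toNat with hl'
    set r' : Nat := right.toNat with hr'
    have hcl : ((l' : Nat) : Int) = left - 1 := by omega
    have hcr : ((r' : Nat) : Int) = right := by omega
    have hlle : l' ≤ r' := by omega
    have hrlen : r' ≤ S.length := by omega
    -- A: the indexing loop is the slice sum, i.e. a difference of prefix sums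
    have hAval : (PySem.List.pyRange (left - 1) right 1).foldl
        (fun acc i => acc + PySem.List.pyGetD S i 0) 0
        = (S.take r').sum - (S.take l').sum := by
      rw [PySem.List.foldl_add, zero_add, ← hcl, ← hcr, map_getD_range S l' r' hrlen]
      have hsplit : S.take r' = S.take l' ++ (S.drop l').take (r' - l') := by
        conv_lhs => rw [show r' = l' + (r' - l') from by omega]
        rw [List.take_add]
      rw [hsplit, List.sum_append]
      ring
    rw [hAval]
    -- B: the sweep is the same difference, by rank counting
    have hhyp0 : ∀ d ∈ ds, ((S.countP (fun w => decide (w < d)) : Nat) : Int)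
        = 0 + (ds.map (fun e => if e < d then ((S.count e : Nat) : Int) else 0)).sum := by
      intro d _
      rw [zero_add]
      exact countP_eq_sum_counts (fun w => w < d) S ds hnd hcov
    rw [sweep_eq S (left - 1) right (by omega) ds 0 0 hpair hhyp0, zero_add,
        sum_map_sub_int, ← hcl, ← hcr]
    rw [← take_sum_eq S ds hsort hnd hcov r' hrlen,
        ← take_sum_eq S ds hsort hnd hcov l' (by omega)]
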